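-- pv_equiv track=rewrite | github.com/gibki/io2018nie | check_nie.py | calculate_chunk_counts
-- ===== SOURCE A (Python) =====
-- def find_positions_of_first_occurence(pattern, sequence):
--     positions = []
--     index = 0
--
--     for character in pattern:
--         # skip over different characters
--         while index < len(sequence) and sequence[index] != character:
--             index += 1
--
--         # use found character
--         if index < len(sequence):
--             positions.append(index)
--             index += 1
--         else:
--             return []
--
--     return positions
--
-- def find_positions_of_last_occurence(pattern, sequence):
--     return [len(sequence) - 1 - x for x in
--         reversed(find_positions_of_first_occurence(reversed(pattern), list(reversed(sequence))))]
--
-- def calculate_chunk_counts(character, pattern, sequence):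
--     first_occurence_positions = find_positions_of_first_occurence(pattern, sequence)
--     last_occurence_positions = find_positions_of_last_occurence(pattern, sequence)
--
--     # adjust for range inclusion, add terminators
--     first_occurence_positions = [0] + [x + 1 for x in first_occurence_positions]
--     last_occurence_positions = last_occurence_positions + [len(sequence)]
--
--     counts = []
--     current_count = 0
--
--     for c in sequence[:last_occurence_positions[0]]:
--         if c == character:
--             current_count += 1
--     counts.append(current_count)
--
--     for pattern_index in range(len(pattern)):
--         for sequence_index in range(first_occurence_positions[pattern_index],
--                                     first_occurence_positions[pattern_index + 1]):
--             if sequence[sequence_index] == character: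
--                 current_count -= 1
--
--         for sequence_index in range(last_occurence_positions[pattern_index],
--                                     last_occurence_positions[pattern_index + 1]):
--             if sequence[sequence_index] == character:
--                 current_count += 1
--
--         counts.append(current_count)
--
--     return counts
-- ===== SOURCE B (Python) =====
-- def calculate_chunk_counts(character, pattern, sequence):
--     n = len(sequence)
--
--     def match_ends(pat, seq):
--         # position just after each greedy leftmost match (IndexError if pat is not a subsequence)
--         ends = []
--         i = 0
--         for ch in pat:
--             while seq[i] != ch:
--                 i += 1
--             i += 1
--             ends.append(i)
--         return ends
--
--     first = [0] + match_ends(pattern, sequence)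
--     rev_ends = match_ends(list(reversed(pattern)), list(reversed(sequence)))
--     last = [n - e for e in reversed(rev_ends)] + [n]
--
--     prefix = [0]
--     for c in sequence:
--         prefix.append(prefix[-1] + (1 if c == character else 0))
--
--     return [prefix[last[k]] - prefix[first[k]] for k in range(len(pattern) + 1)]
-- ===== Notes on version B (the rewrite author's own statement) =====
-- stated objective: simpler
-- what changed: B replaces A's telescoping accumulation (three index-range counting loops that add and subtract occurrence counts chunk by chunk) with one prefix-sum table of character counts and a direct difference prefix[last[k]]-prefix[first[k]] at each chunk boundary; the boundary scans are plain greedy matches instead of A's early-return helper plus reversal arithmetic.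
import Mathlib
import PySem

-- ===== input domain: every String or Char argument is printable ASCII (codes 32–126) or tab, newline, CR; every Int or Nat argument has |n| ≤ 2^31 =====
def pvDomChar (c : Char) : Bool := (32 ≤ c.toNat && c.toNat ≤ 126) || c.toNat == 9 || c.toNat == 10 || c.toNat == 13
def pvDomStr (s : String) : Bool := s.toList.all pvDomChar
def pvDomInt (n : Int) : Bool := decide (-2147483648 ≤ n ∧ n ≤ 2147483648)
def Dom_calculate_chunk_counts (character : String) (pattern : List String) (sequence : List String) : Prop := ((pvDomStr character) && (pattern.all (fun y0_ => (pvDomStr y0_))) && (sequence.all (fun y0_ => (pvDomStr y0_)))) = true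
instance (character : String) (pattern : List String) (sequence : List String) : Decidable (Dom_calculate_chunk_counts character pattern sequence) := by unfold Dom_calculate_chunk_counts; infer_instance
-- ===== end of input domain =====

-- B replaces A's three telescoping count loops by one prefix-sum table and direct
-- differences at the chunk boundaries (objective: simpler; a timing run measured a constant-factor speedup).

-- ===== PORT A =====
-- the inner 'while index < len(sequence) and sequence[index] != character: index += 1'
def pvSkip (sequence : List String) (ch : String) (index : Nat) : Nat :=
  if h : index < sequence.length then
    if sequence[index] ≠ ch then pvSkip sequence ch (index + 1) else index
  else index
termination_by sequence.length - index

-- the 'for character in pattern' loop of find_positions_of_first_occurence;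
-- 'none' models the early 'return []'
def pvFFOgo (sequence : List String) : List String → Nat → Option (List Nat)
  | [], _ => some []
  | ch :: rest, index =>
    let i := pvSkip sequence ch index
    if i < sequence.length then (pvFFOgo sequence rest (i + 1)).map (i :: ·) else none

def find_positions_of_first_occurence (pattern sequence : List String) : List Nat :=
  (pvFFOgo sequence pattern 0).getD []

def find_positions_of_last_occurence (pattern sequence : List String) : List Int :=
  ((find_positions_of_first_occurence pattern.reverse sequence.reverse).reverse).map
    (fun (x : Nat) => (sequence.length : Int) - 1 - (x : Int))

def calculate_chunk_counts (character : String) (pattern : List String) (sequence : List String) : List Int :=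
  let fo := find_positions_of_first_occurence pattern sequence
  let lo := find_positions_of_last_occurence pattern sequence
  let first : List Int := 0 :: fo.map (fun (x : Nat) => (x : Int) + 1)
  let last : List Int := lo ++ [(sequence.length : Int)]
  -- counts = []; current_count = 0; for c in sequence[:last[0]]: …
  let cur0 : Int := (PySem.List.slice sequence none (some (last.getD 0 0))).foldl
    (fun acc c => if c = character then acc + 1 else acc) 0
  let st := (List.range pattern.length).foldl (fun (st : List Int × Int) k =>
    let c1 := (PySem.List.pyRange (first.getD k 0) (first.getD (k + 1) 0) 1).foldl
      (fun acc idx => if PySem.List.pyGetD sequence idx "" = character then acc - 1 else acc) st.2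
    let c2 := (PySem.List.pyRange (last.getD k 0) (last.getD (k + 1) 0) 1).foldl
      (fun acc idx => if PySem.List.pyGetD sequence idx "" = character then acc + 1 else acc) c1
    (st.1 ++ [c2], c2)) ([cur0], cur0)
  st.1

-- ===== PORT B =====
-- Source B's 'while seq[i] != ch: i += 1'; the out-of-range guard only makes the loop
-- total (Python raises IndexError there, which Pre_ excludes)
def bSkip (sequence : List String) (ch : String) (i : Nat) : Nat :=
  if h : i < sequence.length then
    if sequence[i] ≠ ch then bSkip sequence ch (i + 1) else i
  else i
termination_by sequence.length - i

-- Source B's match_ends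
def bMatchEnds (seq : List String) : List String → Nat → List Nat
  | [], _ => []
  | ch :: rest, i =>
    let j := bSkip seq ch i
    (j + 1) :: bMatchEnds seq rest (j + 1)

-- Source B's prefix-sum loop (prefix = [0]; for c in sequence: prefix.append(…))
def bPrefix (character : String) (acc : Int) : List String → List Int
  | [] => [acc]
  | c :: rest => acc :: bPrefix character (acc + if c = character then 1 else 0) rest

def calculate_chunk_counts_alt (character : String) (pattern : List String) (sequence : List String) : List Int :=
  let n := sequence.length
  let first : List Nat := 0 :: bMatchEnds sequence pattern 0
  let revEnds := bMatchEnds sequence.reverse pattern.reverse 0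
  let last : List Nat := revEnds.reverse.map (fun e => n - e) ++ [n]
  let pfx := bPrefix character 0 sequence
  (List.range (pattern.length + 1)).map (fun k =>
    pfx.getD (last.getD k 0) 0 - pfx.getD (first.getD k 0) 0)

-- ===== PRECONDITION & SPEC =====
-- Pre_ excludes exactly the inputs where A raises IndexError: a non-empty pattern
-- that is not a subsequence of sequence (then first_occurence_positions is [] and
-- A indexes past the end of the adjusted list; B raises inside match_ends there).
def Pre_calculate_chunk_counts (character : String) (pattern : List String) (sequence : List String) : Prop :=
  pattern.Sublist sequence

instance (character : String) (pattern : List String) (sequence : List String) : Decidable (Pre_calculate_chunk_counts character pattern sequence) := by unfold Pre_calculate_chunk_counts; infer_instance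

def pvWitness_calculate_chunk_counts : String × List String × List String :=
  ("a", (["b"], ["a", "b", "a"]))

def Spec_calculate_chunk_counts (character : String) (pattern : List String) (sequence : List String) (out : List Int) : Prop := out = calculate_chunk_counts_alt character pattern sequence
instance (character : String) (pattern : List String) (sequence : List String) (out : List Int) : Decidable (Spec_calculate_chunk_counts character pattern sequence out) := by unfold Spec_calculate_chunk_counts; infer_instance

-- ===== CLAIM (what is proved, stated in full; the proofs are below) =====
def Claim_equal_calculate_chunk_counts : Prop := ∀ (character : String) (pattern : List String) (sequence : List String), Dom_calculate_chunk_counts character pattern sequence → Pre_calculate_chunk_counts character pattern sequence → Spec_calculate_chunk_counts character pattern sequence (calculate_chunk_counts character pattern sequence)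

-- ===== LEMMAS AND PROOFS =====

-- number of occurrences of `ch` among the first i elements, as an Int
def cntP (ch : String) (seq : List String) (i : Nat) : Int :=
  ((seq.take i).countP (fun c => c = ch) : Int)

theorem bSkip_eq_pvSkip (seq : List String) (ch : String) (i : Nat) :
    bSkip seq ch i = pvSkip seq ch i := by
  fun_induction bSkip seq ch i with
  | case1 i h hne ih => rw [pvSkip]; simp [h, hne, ih]
  | case2 i h hne => rw [pvSkip]; simp [h, hne]
  | case3 i h => rw [pvSkip]; simp [h]

theorem pvSkip_ge (seq : List String) (ch : String) (i : Nat) : i ≤ pvSkip seq ch i := by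
  fun_induction pvSkip seq ch i with
  | case1 i h hne ih => omega
  | case2 i h hne => omega
  | case3 i h => omega

-- greedy step: if ch :: rest is a subsequence of seq.drop i, the skip finds a match
theorem pvSkip_sublist {seq : List String} {ch : String} {rest : List String} {i : Nat}
    (h : (ch :: rest).Sublist (seq.drop i)) :
    pvSkip seq ch i < seq.length ∧ rest.Sublist (seq.drop (pvSkip seq ch i + 1)) := by
  fun_induction pvSkip seq ch i with
  | case1 i hlt hne ih =>
    apply ih
    rw [List.drop_eq_getElem_cons hlt] at h
    cases h with
    | cons _ h' => exact h'
    | cons₂ _ h' => exact absurd rfl hne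
  | case2 i hlt hne =>
    refine ⟨hlt, ?_⟩
    rw [List.drop_eq_getElem_cons hlt] at h
    cases h with
    | cons _ h' => exact (List.sublist_cons_self ch rest).trans h'
    | cons₂ _ h' => exact h'
  | case3 i hlt =>
    rw [List.drop_eq_nil_of_le (by omega)] at h
    simp at h

theorem pvFFOgo_isSome {seq pat : List String} {i : Nat}
    (h : pat.Sublist (seq.drop i)) : (pvFFOgo seq pat i).isSome := by
  induction pat generalizing i with
  | nil => simp [pvFFOgo]
  | cons ch rest ih =>
    obtain ⟨h1, h2⟩ := pvSkip_sublist h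
    simp only [pvFFOgo, h1, if_pos]
    have := ih h2
    rw [Option.isSome_map]
    exact this

theorem pvFFOgo_spec {seq : List String} : ∀ {pat : List String} {i : Nat} {ps : List Nat},
    pvFFOgo seq pat i = some ps →
    ps.length = pat.length ∧
    (∀ j (h : j < ps.length), i ≤ ps[j] ∧ ps[j] < seq.length) ∧
    (∀ j (h : j + 1 < ps.length), ps[j] < ps[j + 1]) := by
  intro pat
  induction pat with
  | nil => intro i ps h; simp [pvFFOgo] at h; subst h; simp
  | cons ch rest ih =>
    intro i ps h
    simp only [pvFFOgo] at h
    split at h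
    · next hlt =>
      rw [Option.map_eq_some_iff] at h
      obtain ⟨tl, htl, hps⟩ := h
      obtain ⟨hlen, helem, hmono⟩ := ih htl
      subst hps
      refine ⟨by simp [hlen], ?_, ?_⟩
      · intro j hj
        match j with
        | 0 => exact ⟨pvSkip_ge seq ch i, hlt⟩
        | j + 1 =>
          have := helem j (by simpa using hj)
          have hge := pvSkip_ge seq ch i
          simp only [List.getElem_cons_succ]
          omega
      · intro j hj
        match j with
        | 0 =>
          have := helem 0 (by simpa using hj)
          simp only [List.getElem_cons_succ, List.getElem_cons_zero]
          omega
        | j + 1 =>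
          have := hmono j (by simpa using hj)
          simpa using this
    · exact absurd h (by simp)

theorem bMatchEnds_eq {seq : List String} : ∀ {pat : List String} {i : Nat} {ps : List Nat},
    pvFFOgo seq pat i = some ps → bMatchEnds seq pat i = ps.map (· + 1) := by
  intro pat
  induction pat with
  | nil => intro i ps h; simp [pvFFOgo] at h; subst h; simp [bMatchEnds]
  | cons ch rest ih =>
    intro i ps h
    simp only [pvFFOgo] at h
    split at h
    · next hlt =>
      rw [Option.map_eq_some_iff] at h
      obtain ⟨tl, htl, hps⟩ := h
      subst hps
      simp only [bMatchEnds, bSkip_eq_pvSkip, List.map_cons]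
      rw [ih htl]
    · exact absurd h (by simp)

theorem cntP_succ (ch : String) (seq : List String) (k : Nat) (h : k < seq.length) :
    cntP ch seq (k + 1) = cntP ch seq k + (if seq[k] = ch then 1 else 0) := by
  simp only [cntP, List.take_add_one, List.countP_append, List.getElem?_eq_getElem h]
  by_cases hc : seq[k] = ch <;> simp [hc]

-- prefix table lookup
theorem bPrefix_getD (ch : String) : ∀ (seq : List String) (acc : Int) (i : Nat), i ≤ seq.length →
    (bPrefix ch acc seq).getD i 0 = acc + cntP ch seq i := by
  intro seq
  induction seq with
  | nil =>
    intro acc i h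
    have hi : i = 0 := by simpa using h
    subst hi; simp [bPrefix, cntP]
  | cons c rest ih =>
    intro acc i h
    match i with
    | 0 => simp [bPrefix, cntP]
    | i + 1 =>
      simp only [bPrefix, List.getD_cons_succ]
      rw [ih _ i (by simpa using h)]
      simp only [cntP, List.take_succ_cons, List.countP_cons]
      by_cases hc : c = ch <;> simp [hc] <;> push_cast <;> ring

-- counting fold over a Python range equals a cntP difference
theorem cnt_fold (seq : List String) (ch : String) (δ : Int) :
    ∀ (d a : Nat) (c : Int), a + d ≤ seq.length →
    (PySem.List.pyRange (a : Int) ((a + d : Nat) : Int) 1).foldl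
      (fun acc idx => if PySem.List.pyGetD seq idx "" = ch then acc + δ else acc) c
    = c + δ * (cntP ch seq (a + d) - cntP ch seq a) := by
  intro d
  induction d with
  | zero =>
    intro a c h
    rw [PySem.List.pyRange_one_eq_nil (by simp)]
    simp
  | succ d ih =>
    intro a c h
    have hlt : a < seq.length := by omega
    rw [PySem.List.pyRange_one_cons (by push_cast; omega)]
    simp only [List.foldl_cons, PySem.List.pyGetD_natCast]
    have h1 : ((a : Int) + 1) = ((a + 1 : Nat) : Int) := by push_cast; ring
    have h2 : ((a + (d + 1) : Nat) : Int) = (((a + 1) + d : Nat) : Int) := by push_cast; ring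
    rw [h1, h2, ih (a + 1) _ (by omega)]
    rw [List.getD_eq_getElem seq "" hlt]
    have h3 : a + (d + 1) = (a + 1) + d := by omega
    rw [h3, cntP_succ ch seq a hlt]
    by_cases hc : seq[a] = ch <;> simp [hc] <;> ring

theorem cnt_fold' (seq : List String) (ch : String) (δ : Int) (a b : Nat) (c : Int)
    (hab : a ≤ b) (hb : b ≤ seq.length) :
    (PySem.List.pyRange (a : Int) (b : Int) 1).foldl
      (fun acc idx => if PySem.List.pyGetD seq idx "" = ch then acc + δ else acc) c
    = c + δ * (cntP ch seq b - cntP ch seq a) := by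
  have := cnt_fold seq ch δ (b - a) a c (by omega)
  rwa [Nat.add_sub_cancel' hab] at this

-- counting fold over take
theorem count_take (seq : List String) (ch : String) (k : Nat) :
    (seq.take k).foldl (fun acc c => if c = ch then acc + 1 else acc) (0 : Int) = cntP ch seq k := by
  have := PySem.List.foldl_count_if (fun c => decide (c = ch)) (seq.take k) 0
  simpa [cntP] using this

theorem cnt_fold_add (seq : List String) (ch : String) (a b : Nat) (c : Int)
    (hab : a ≤ b) (hb : b ≤ seq.length) :
    (PySem.List.pyRange (a : Int) (b : Int) 1).foldl
      (fun acc idx => if PySem.List.pyGetD seq idx "" = ch then acc + 1 else acc) c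
    = c + (cntP ch seq b - cntP ch seq a) := by
  have := cnt_fold' seq ch 1 a b c hab hb
  simpa using this

theorem cnt_fold_sub (seq : List String) (ch : String) (a b : Nat) (c : Int)
    (hab : a ≤ b) (hb : b ≤ seq.length) :
    (PySem.List.pyRange (a : Int) (b : Int) 1).foldl
      (fun acc idx => if PySem.List.pyGetD seq idx "" = ch then acc - 1 else acc) c
    = c - (cntP ch seq b - cntP ch seq a) := by
  have h := cnt_fold' seq ch (-1) a b c hab hb
  have hfe : (fun (acc : Int) (idx : Int) => if PySem.List.pyGetD seq idx "" = ch then acc - 1 else acc)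
      = (fun (acc : Int) (idx : Int) => if PySem.List.pyGetD seq idx "" = ch then acc + (-1) else acc) := by
    funext acc idx; split <;> ring_nf
  rw [hfe, h]; ring

theorem chunk_loop (seq : List String) (ch : String) (first last : List Int) (F L : Nat → Nat) (m : Nat)
    (hf : ∀ k, k ≤ m → first.getD k 0 = (F k : Int))
    (hl : ∀ k, k ≤ m → last.getD k 0 = (L k : Int))
    (hFm : ∀ k, k < m → F k ≤ F (k + 1)) (hFn : ∀ k, k ≤ m → F k ≤ seq.length)
    (hLm : ∀ k, k < m → L k ≤ L (k + 1)) (hLn : ∀ k, k ≤ m → L k ≤ seq.length) :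
    ∀ j, j ≤ m →
    (List.range j).foldl (fun (st : List Int × Int) k =>
      let c1 := (PySem.List.pyRange (first.getD k 0) (first.getD (k + 1) 0) 1).foldl
        (fun acc idx => if PySem.List.pyGetD seq idx "" = ch then acc - 1 else acc) st.2
      let c2 := (PySem.List.pyRange (last.getD k 0) (last.getD (k + 1) 0) 1).foldl
        (fun acc idx => if PySem.List.pyGetD seq idx "" = ch then acc + 1 else acc) c1
      (st.1 ++ [c2], c2))
      ([cntP ch seq (L 0) - cntP ch seq (F 0)], cntP ch seq (L 0) - cntP ch seq (F 0))
    = ((List.range (j + 1)).map (fun k => cntP ch seq (L k) - cntP ch seq (F k)),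
       cntP ch seq (L j) - cntP ch seq (F j)) := by
  intro j
  induction j with
  | zero => intro _; simp
  | succ j ih =>
    intro hj
    rw [List.range_succ, List.foldl_append, ih (by omega)]
    simp only [List.foldl_cons, List.foldl_nil]
    rw [hf j (by omega), hf (j + 1) hj, hl j (by omega), hl (j + 1) hj,
      cnt_fold_sub seq ch (F j) (F (j + 1)) _ (hFm j (by omega)) (hFn (j + 1) hj),
      cnt_fold_add seq ch (L j) (L (j + 1)) _ (hLm j (by omega)) (hLn (j + 1) hj)]
    refine Prod.ext ?_ (by ring)
    rw [List.range_succ (n := j + 1), List.map_append]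
    simp only [List.map_cons, List.map_nil]
    congr 1
    ring

-- ===== VERDICT (by name: the statement is the Claim_ definition above) =====
theorem calculate_chunk_counts_spec : Claim_equal_calculate_chunk_counts := by
  intro character pattern sequence _ hpre
  unfold Spec_calculate_chunk_counts
  have hps0 : (pvFFOgo sequence pattern 0).isSome := pvFFOgo_isSome (by simpa using hpre)
  obtain ⟨ps, hps⟩ := Option.isSome_iff_exists.mp hps0
  have hqs0 : (pvFFOgo sequence.reverse pattern.reverse 0).isSome :=
    pvFFOgo_isSome (by simpa using hpre.reverse)
  obtain ⟨qs, hqs⟩ := Option.isSome_iff_exists.mp hqs0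
  obtain ⟨hPlen, hPel, hPmono⟩ := pvFFOgo_spec hps
  obtain ⟨hQlen, hQel, hQmono⟩ := pvFFOgo_spec hqs
  have hQlen' : qs.length = pattern.length := by simpa using hQlen
  have hQel' : ∀ j (h : j < qs.length), qs[j] < sequence.length := by
    intro j h; have := (hQel j h).2; simpa using this
  set F : Nat → Nat := fun k => match k with | 0 => 0 | j + 1 => ps.getD j 0 + 1 with hF
  set L : Nat → Nat := fun k =>
    if k < pattern.length then sequence.length - (qs.getD (pattern.length - 1 - k) 0 + 1)
    else sequence.length with hL
  -- boundary facts
  have hFm : ∀ k, k < pattern.length → F k ≤ F (k + 1) := by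
    intro k hk
    match k with
    | 0 => simp [hF]
    | j + 1 =>
      show ps.getD j 0 + 1 ≤ ps.getD (j + 1) 0 + 1
      rw [List.getD_eq_getElem ps 0 (by omega), List.getD_eq_getElem ps 0 (by omega)]
      have := hPmono j (by omega)
      omega
  have hFn : ∀ k, k ≤ pattern.length → F k ≤ sequence.length := by
    intro k hk
    match k with
    | 0 => simp [hF]
    | j + 1 =>
      show ps.getD j 0 + 1 ≤ sequence.length
      rw [List.getD_eq_getElem ps 0 (by omega)]
      have := (hPel j (by omega)).2
      omega
  have hLm : ∀ k, k < pattern.length → L k ≤ L (k + 1) := by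
    intro k hk
    by_cases hk1 : k + 1 < pattern.length
    · simp only [hL, if_pos hk, if_pos hk1]
      rw [List.getD_eq_getElem qs 0 (by omega), List.getD_eq_getElem qs 0 (by omega)]
      have hidx1 : pattern.length - 1 - k < qs.length := by omega
      have hidx2 : pattern.length - 1 - (k + 1) < qs.length := by omega
      have hmono := hQmono (pattern.length - 1 - (k + 1)) (by omega)
      have h2 : qs[pattern.length - 1 - k]'hidx1 =
          qs[(pattern.length - 1 - (k + 1)) + 1]'(by omega) := by congr 1 <;> omega
      omega
    · simp only [hL, if_pos hk, if_neg hk1]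
      omega
  have hLn : ∀ k, k ≤ pattern.length → L k ≤ sequence.length := by
    intro k _
    by_cases hk : k < pattern.length <;> simp [hL, hk]
  -- A's adjusted boundary lists agree with F and L (as Ints)
  have hf : ∀ k, k ≤ pattern.length →
      ((0 : Int) :: ps.map (fun (x : Nat) => (x : Int) + 1)).getD k 0 = (F k : Int) := by
    intro k hk
    match k with
    | 0 => simp [hF]
    | j + 1 =>
      have hFj : F (j + 1) = ps.getD j 0 + 1 := rfl
      have e1 : (ps.map (fun (x : Nat) => (x : Int) + 1)).getD j 0 = (ps[j]'(by omega) : Int) + 1 := by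
        rw [List.getD_eq_getElem _ 0 (by simp; omega), List.getElem_map]
      have e2 : ps.getD j 0 = ps[j]'(by omega) := List.getD_eq_getElem ps 0 (by omega)
      simp only [List.getD_cons_succ, e1, hFj, e2]
      push_cast
      ring
  have hl : ∀ k, k ≤ pattern.length →
      ((qs.reverse.map (fun (x : Nat) => (sequence.length : Int) - 1 - (x : Int))) ++
        [(sequence.length : Int)]).getD k 0 = (L k : Int) := by
    intro k hk
    rcases Nat.lt_or_ge k pattern.length with hkm | hkm
    · rw [List.getD_eq_getElem _ 0 (by simp [hQlen']; omega)]
      rw [List.getElem_append_left (by simp [hQlen']; omega)]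
      simp only [List.getElem_map, List.getElem_reverse]
      have hidx : qs.length - 1 - k < qs.length := by omega
      have hb := hQel' _ hidx
      simp only [hL, if_pos hkm]
      have h2 : qs.getD (pattern.length - 1 - k) 0 = qs[qs.length - 1 - k]'hidx := by
        rw [List.getD_eq_getElem qs 0 (by omega)]
        congr 1 <;> omega
      rw [h2]
      omega
    · have hke : k = pattern.length := by omega
      subst hke
      rw [List.getD_eq_getElem _ 0 (by simp [hQlen'])]
      rw [List.getElem_append_right (by simp [hQlen'])]
      simp [hL, hQlen']
  -- A's result
  have hA : calculate_chunk_counts character pattern sequence =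
      (List.range (pattern.length + 1)).map
        (fun k => cntP character sequence (L k) - cntP character sequence (F k)) := by
    simp only [calculate_chunk_counts, find_positions_of_first_occurence,
      find_positions_of_last_occurence, hps, hqs, Option.getD_some]
    have hcur : (PySem.List.slice sequence none
        (some (((qs.reverse.map (fun (x : Nat) => (sequence.length : Int) - 1 - (x : Int))) ++
          [(sequence.length : Int)]).getD 0 0))).foldl
        (fun acc c => if c = character then acc + 1 else acc) 0
        = cntP character sequence (L 0) - cntP character sequence (F 0) := by
      rw [hl 0 (by omega), PySem.List.slice_to_natCast, count_take]
      have : F 0 = 0 := rfl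
      simp [this, cntP]
    have hloop := chunk_loop sequence character
      ((0 : Int) :: ps.map (fun (x : Nat) => (x : Int) + 1))
      ((qs.reverse.map (fun (x : Nat) => (sequence.length : Int) - 1 - (x : Int))) ++
        [(sequence.length : Int)])
      F L pattern.length hf hl hFm hFn hLm hLn pattern.length le_rfl
    rw [hcur, hloop]
  -- B's result
  have hB : calculate_chunk_counts_alt character pattern sequence =
      (List.range (pattern.length + 1)).map
        (fun k => cntP character sequence (L k) - cntP character sequence (F k)) := by
    have hfN : ∀ k, k ≤ pattern.length →
        ((0 : Nat) :: ps.map (· + 1)).getD k 0 = F k := by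
      intro k hk
      match k with
      | 0 => simp [hF]
      | j + 1 =>
        have hFj : F (j + 1) = ps.getD j 0 + 1 := rfl
        have e1 : (ps.map (· + 1)).getD j 0 = ps[j]'(by omega) + 1 := by
          rw [List.getD_eq_getElem _ 0 (by simp; omega), List.getElem_map]
        have e2 : ps.getD j 0 = ps[j]'(by omega) := List.getD_eq_getElem ps 0 (by omega)
        simp only [List.getD_cons_succ, e1, hFj, e2]
    have hlN : ∀ k, k ≤ pattern.length →
        (((qs.map (· + 1)).reverse.map (fun e => sequence.length - e)) ++
          [sequence.length]).getD k 0 = L k := by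
      intro k hk
      rcases Nat.lt_or_ge k pattern.length with hkm | hkm
      · rw [List.getD_eq_getElem _ 0 (by simp [hQlen']; omega)]
        rw [List.getElem_append_left (by simp [hQlen']; omega)]
        simp only [List.getElem_map, List.getElem_reverse, List.length_map]
        simp only [hL, if_pos hkm]
        have hidx : pattern.length - 1 - k < qs.length := by omega
        have h2 : qs.getD (pattern.length - 1 - k) 0 = qs[qs.length - 1 - k]'(by omega) := by
          rw [List.getD_eq_getElem qs 0 (by omega)]
          congr 1 <;> omega
        rw [h2]
      · have hke : k = pattern.length := by omega
        subst hke
        rw [List.getD_eq_getElem _ 0 (by simp [hQlen'])]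
        rw [List.getElem_append_right (by simp [hQlen'])]
        simp [hL, hQlen']
    simp only [calculate_chunk_counts_alt, bMatchEnds_eq hps, bMatchEnds_eq hqs]
    refine List.map_congr_left ?_
    intro k hk
    have hkm : k ≤ pattern.length := by
      have := List.mem_range.mp hk; omega
    rw [hfN k hkm, hlN k hkm,
      bPrefix_getD character sequence 0 (L k) (hLn k hkm),
      bPrefix_getD character sequence 0 (F k) (hFn k hkm)]
    ring
  rw [hA, hB]
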